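-- pv_equiv track=rewrite | github.com/kongtaehun/CodingTestPrac | BAEKJOON/DFS와bBFS/9205-맥주마시면서걸어가기.py | setGraph
-- ===== SOURCE A (Python) =====
-- def setGraph(nodes):
--     graph = [[] for i in range(len(nodes))]
--     for i in range(len(nodes)):
--         for j in range(i+1, len(nodes)):
--             dist = abs(nodes[i][0]-nodes[j][0])+abs(nodes[i][1]-nodes[j][1])
--             # 맥주 20병에 1000미터를 갈수 있으므로
--             if dist <= 1000:
--                 graph[i].append(j)
--                 graph[j].append(i)
--     return graph
-- ===== SOURCE B (Python) =====
-- def setGraph(nodes):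
--     n = len(nodes)
--     # rotate 45 degrees: manhattan(p,q) = max(|du|, |dv|) with u=x+y, v=x-y;
--     # sweep nodes in increasing u, pairing each node only with the nearby-u window behind it
--     order = sorted(range(n), key=lambda k: nodes[k][0] + nodes[k][1])
--     rows = [[] for _ in range(n)]
--     for a in range(n):
--         i = order[a]
--         ui = nodes[i][0] + nodes[i][1]
--         vi = nodes[i][0] - nodes[i][1]
--         b = a - 1
--         while b >= 0 and ui - (nodes[order[b]][0] + nodes[order[b]][1]) <= 1000:
--             j = order[b]
--             if abs(vi - (nodes[j][0] - nodes[j][1])) <= 1000: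
--                 rows[i].append(j)
--                 rows[j].append(i)
--             b -= 1
--     return [sorted(r) for r in rows]
-- ===== Notes on version B (the rewrite author's own statement) =====
-- stated objective: alternative
-- what changed: Replaces A's all-pairs upper-triangular Manhattan scan with mirrored appends by a sweep: rotate to u=x+y, v=x-y (Manhattan = Chebyshev there), sort indices by u, pair each node only against the trailing window with u within 1000 (breaking out of the scan as soon as u differs by more), then sort each row.
import Mathlib
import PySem

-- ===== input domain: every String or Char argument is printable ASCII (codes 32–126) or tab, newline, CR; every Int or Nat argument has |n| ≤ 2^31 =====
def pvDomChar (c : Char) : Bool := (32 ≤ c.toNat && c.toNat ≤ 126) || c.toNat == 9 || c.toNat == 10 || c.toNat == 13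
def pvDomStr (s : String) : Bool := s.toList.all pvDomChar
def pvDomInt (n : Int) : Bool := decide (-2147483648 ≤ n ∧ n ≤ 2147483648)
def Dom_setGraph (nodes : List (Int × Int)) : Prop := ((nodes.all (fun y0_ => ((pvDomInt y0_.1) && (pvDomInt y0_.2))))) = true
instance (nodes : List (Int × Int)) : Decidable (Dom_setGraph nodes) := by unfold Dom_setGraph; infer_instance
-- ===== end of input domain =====

-- B replaces A's all-pairs upper-triangular scan by a sweep algorithm: rotate to
-- u = x+y, v = x-y (Manhattan distance = max(|du|,|dv|)), sort the indices by u,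
-- pair each node only with the trailing window of nodes whose u lies within 1000,
-- and sort each adjacency row at the end (objective: alternative).

-- ===== PORT A =====
-- inner loop body: the nodes[i]/nodes[j] indices are always in range, so getD is exact
def setGraphInner (nodes : List (Int × Int)) (i : Nat) (g : List (List Int)) (j : Nat) :
    List (List Int) :=
  let dist := |(nodes.getD i (0,0)).1 - (nodes.getD j (0,0)).1| +
              |(nodes.getD i (0,0)).2 - (nodes.getD j (0,0)).2|
  if dist ≤ 1000 then
    (g.modify i (fun r => r ++ [(j : Int)])).modify j (fun r => r ++ [(i : Int)])
  else g

def setGraph (nodes : List (Int × Int)) : List (List Int) :=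
  (List.range nodes.length).foldl
    (fun g i => (List.range' (i+1) (nodes.length - (i+1))).foldl (setGraphInner nodes i) g)
    ((List.range nodes.length).map (fun _ => ([] : List Int)))

-- ===== PORT B =====
-- rotated coordinates u = x+y, v = x-y (indices are always in range, so getD is exact)
def pvU (nodes : List (Int × Int)) (k : Nat) : Int :=
  (nodes.getD k (0,0)).1 + (nodes.getD k (0,0)).2

def pvV (nodes : List (Int × Int)) (k : Nat) : Int :=
  (nodes.getD k (0,0)).1 - (nodes.getD k (0,0)).2

-- the 'while b >= 0 and ui - u(order[b]) <= 1000' loop; counter cnt = b+1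
def setGraphAltInner (nodes : List (Int × Int)) (order : List Nat) (i : Nat) (ui vi : Int) :
    Nat → List (List Int) → List (List Int)
  | 0, rows => rows
  | cnt+1, rows =>
    let j := order.getD cnt 0
    if ui - pvU nodes j ≤ 1000 then
      setGraphAltInner nodes order i ui vi cnt
        (if |vi - pvV nodes j| ≤ 1000 then
           (rows.modify i (fun r => r ++ [(j : Int)])).modify j (fun r => r ++ [(i : Int)])
         else rows)
    else rows

def setGraph_alt (nodes : List (Int × Int)) : List (List Int) :=
  let n := nodes.length
  let order := PySem.List.sorted (List.range n) (fun k => pvU nodes k) false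
  ((List.range n).foldl
      (fun rows a =>
        let i := order.getD a 0
        setGraphAltInner nodes order i (pvU nodes i) (pvV nodes i) a rows)
      ((List.range n).map (fun _ => ([] : List Int)))).map
    (fun r => PySem.List.sorted r (fun x => x) false)

-- ===== PRECONDITION & SPEC =====
def Spec_setGraph (nodes : List (Int × Int)) (out : List (List Int)) : Prop := out = setGraph_alt nodes
instance (nodes : List (Int × Int)) (out : List (List Int)) : Decidable (Spec_setGraph nodes out) := by unfold Spec_setGraph; infer_instance

-- ===== CLAIM (what is proved, stated in full; the proofs are below) =====
def Claim_equal_setGraph : Prop := ∀ (nodes : List (Int × Int)), Dom_setGraph nodes → Spec_setGraph nodes (setGraph nodes)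

-- ===== LEMMAS AND PROOFS =====

def pvDist (nodes : List (Int × Int)) (k m : Nat) : Int :=
  |(nodes.getD k (0,0)).1 - (nodes.getD m (0,0)).1| +
  |(nodes.getD k (0,0)).2 - (nodes.getD m (0,0)).2|

def pvAdj (nodes : List (Int × Int)) (k m : Nat) : Bool :=
  decide (m ≠ k) && decide (pvDist nodes k m ≤ 1000)

-- the ascending adjacency row of node k (both programs produce it)
def pvRowAll (nodes : List (Int × Int)) (k : Nat) : List Int :=
  ((List.range nodes.length).filter (fun m => pvAdj nodes k m)).map (fun m : Nat => (m : Int))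

lemma pvDist_symm (nodes : List (Int × Int)) (k m : Nat) :
    pvDist nodes k m = pvDist nodes m k := by
  unfold pvDist; rw [abs_sub_comm, abs_sub_comm ((nodes.getD k (0,0)).2)]

-- ========== A-side: the upper-triangular double loop fills pvRowAll ==========

-- processed-pairs condition at the moment the inner loop of outer iteration i reaches j = J
def pvC (i J k m : Nat) : Bool :=
  decide (min k m < i ∨ (min k m = i ∧ max k m < J))

-- row of node k when all pairs with smaller endpoint < i have been processed
def pvCS (i k m : Nat) : Bool := decide (min k m < i)

def pvRow (nodes : List (Int × Int)) (c : Nat → Bool) (k : Nat) : List Int :=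
  ((List.range nodes.length).filter (fun m => pvAdj nodes k m && c m)).map (fun m : Nat => (m : Int))

def pvInv (nodes : List (Int × Int)) (c : Nat → Nat → Bool) (g : List (List Int)) : Prop :=
  g.length = nodes.length ∧ ∀ k, (h : k < g.length) → g[k] = pvRow nodes (c k) k

lemma pv_filter_flip {f f' : Nat → Bool} {n j : Nat} (hj : j < n)
    (hfj : f j = false) (hf'j : f' j = true)
    (hag : ∀ m, m ≠ j → f' m = f m) (hhigh : ∀ m, j < m → f m = false) :
    (List.range n).filter f' = (List.range n).filter f ++ [j] := by
  have hn : n = (j+1) + (n - (j+1)) := by omega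
  rw [hn, List.range_add, List.filter_append, List.filter_append, List.range_succ,
      List.filter_append, List.filter_append]
  have e1 : (List.range j).filter f' = (List.range j).filter f := by
    apply List.filter_congr
    intro m hm
    exact hag m (by have := List.mem_range.mp hm; omega)
  have e2 : ([j].filter f') = [j] := by simp [hf'j]
  have e3 : ([j].filter f) = [] := by simp [hfj]
  have e4 : ∀ g : Nat → Bool, (∀ m, j < m → g m = false) →
      ((List.range (n - (j+1))).map (fun x => (j+1) + x)).filter g = [] := by
    intro g hg
    rw [List.filter_eq_nil_iff]
    intro a ha
    rcases List.mem_map.mp ha with ⟨x, _, rfl⟩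
    simp [hg ((j+1)+x) (by omega)]
  have e5 := e4 f hhigh
  have e6 : ∀ m, j < m → f' m = false := fun m hm => by
    rw [hag m (by omega)]; exact hhigh m hm
  rw [e1, e2, e3, e4 f' e6, e5]
  simp

lemma pv_step (nodes : List (Int × Int)) (i j : Nat) (hij : i < j) (hj : j < nodes.length)
    (g : List (List Int)) (hInv : pvInv nodes (pvC i j) g) :
    pvInv nodes (pvC i (j+1)) (setGraphInner nodes i g j) := by
  obtain ⟨hlen, hrow⟩ := hInv
  unfold setGraphInner
  by_cases hd : |(nodes.getD i (0,0)).1 - (nodes.getD j (0,0)).1| +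
                |(nodes.getD i (0,0)).2 - (nodes.getD j (0,0)).2| ≤ 1000
  · simp only [hd, if_pos]
    refine ⟨by simp [List.length_modify, hlen], ?_⟩
    intro k hk
    have hk2 : k < g.length := by simpa [List.length_modify] using hk
    rw [List.getElem_modify, List.getElem_modify]
    by_cases hkj : j = k
    · subst hkj
      have hji : ¬ (i = j) := by omega
      simp only [hji, if_false]
      rw [hrow j hk2]
      unfold pvRow
      rw [pv_filter_flip (f := fun m => pvAdj nodes j m && pvC i j j m)
            (f' := fun m => pvAdj nodes j m && pvC i (j+1) j m) (j := i) (by omega)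
            ?_ ?_ ?_ ?_]
      · simp
      · simp only [pvC, Bool.and_eq_false_iff]
        right; simp only [decide_eq_false_iff_not]; omega
      · simp only [pvAdj, pvC, Bool.and_eq_true, decide_eq_true_eq]
        refine ⟨⟨by omega, ?_⟩, by omega⟩
        rw [pvDist_symm]; exact hd
      · intro m hmi
        have h5 : pvC i (j+1) j m = pvC i j j m := by
          simp only [pvC, decide_eq_decide]; omega
        simp only [h5]
      · intro m him
        simp only [pvC, Bool.and_eq_false_iff]
        right; simp only [decide_eq_false_iff_not]; omega
    · by_cases hki : i = k
      · subst hki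
        simp only [hkj, if_false]
        rw [hrow i hk2]
        unfold pvRow
        rw [pv_filter_flip (f := fun m => pvAdj nodes i m && pvC i j i m)
              (f' := fun m => pvAdj nodes i m && pvC i (j+1) i m) (j := j) hj
              ?_ ?_ ?_ ?_]
        · simp
        · simp only [pvC, Bool.and_eq_false_iff]
          right; simp only [decide_eq_false_iff_not]; omega
        · simp only [pvAdj, pvC, Bool.and_eq_true, decide_eq_true_eq]
          exact ⟨⟨by omega, hd⟩, by omega⟩
        · intro m hmj
          have h5 : pvC i (j+1) i m = pvC i j i m := by
            simp only [pvC, decide_eq_decide]; omega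
          simp only [h5]
        · intro m hjm
          simp only [pvC, Bool.and_eq_false_iff]
          right; simp only [decide_eq_false_iff_not]; omega
      · simp only [hkj, hki, if_false]
        rw [hrow k hk2]
        unfold pvRow
        have hf : ∀ m ∈ List.range nodes.length,
            (pvAdj nodes k m && pvC i j k m) = (pvAdj nodes k m && pvC i (j+1) k m) := by
          intro m _
          have hki' : k ≠ i := fun h => hki h.symm
          have hkj' : k ≠ j := fun h => hkj h.symm
          have h5 : pvC i (j+1) k m = pvC i j k m := by
            simp only [pvC, decide_eq_decide]; omega
          rw [h5]
        rw [List.filter_congr hf]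
  · simp only [hd, if_false]
    refine ⟨hlen, ?_⟩
    intro k hk
    rw [hrow k hk]
    unfold pvRow
    have hf : ∀ m ∈ List.range nodes.length,
        (pvAdj nodes k m && pvC i j k m) = (pvAdj nodes k m && pvC i (j+1) k m) := by
      intro m _
      by_cases ha : pvAdj nodes k m = true
      · rw [ha]
        simp only [Bool.true_and]
        have hma : m ≠ k ∧ pvDist nodes k m ≤ 1000 := by
          simpa [pvAdj] using ha
        have hnkm : ¬ (min k m = i ∧ max k m = j) := by
          rintro ⟨h1, h2⟩
          rcases Nat.lt_or_ge k m with h | h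
          · have hki : k = i := by omega
            have hmj : m = j := by omega
            subst hki; subst hmj
            exact hd hma.2
          · have hmi : m = i := by omega
            have hkj2 : k = j := by omega
            subst hmi; subst hkj2
            have h6 := hma.2
            rw [pvDist_symm] at h6
            exact hd h6
        simp only [pvC, decide_eq_decide]
        omega
      · rw [Bool.not_eq_true] at ha
        rw [ha]; simp
    rw [List.filter_congr hf]

lemma pv_inner (nodes : List (Int × Int)) (i : Nat) :
    ∀ (c j : Nat) (g : List (List Int)), i < j → j + c = nodes.length →
      pvInv nodes (pvC i j) g →
      pvInv nodes (pvC i nodes.length)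
        ((List.range' j c).foldl (setGraphInner nodes i) g) := by
  intro c
  induction c with
  | zero =>
    intro j g hij hjc hInv
    simpa [← hjc] using hInv
  | succ c ih =>
    intro j g hij hjc hInv
    rw [List.range'_succ, List.foldl_cons]
    exact ih (j+1) _ (by omega) (by omega)
      (pv_step nodes i j hij (by omega) g hInv)

lemma pv_start (nodes : List (Int × Int)) (i : Nat) (g : List (List Int))
    (h : pvInv nodes (pvCS i) g) : pvInv nodes (pvC i (i+1)) g := by
  obtain ⟨hlen, hrow⟩ := h
  refine ⟨hlen, ?_⟩
  intro k hk
  rw [hrow k hk]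
  unfold pvRow
  have hf : ∀ m ∈ List.range nodes.length,
      (pvAdj nodes k m && pvCS i k m) = (pvAdj nodes k m && pvC i (i+1) k m) := by
    intro m _
    by_cases ha : pvAdj nodes k m = true
    · rw [ha]
      simp only [Bool.true_and]
      have hne : m ≠ k := by
        simp only [pvAdj, Bool.and_eq_true, decide_eq_true_eq] at ha
        exact ha.1
      simp only [pvC, pvCS, decide_eq_decide]
      omega
    · rw [Bool.not_eq_true] at ha; rw [ha]; simp
  rw [List.filter_congr hf]

lemma pv_end (nodes : List (Int × Int)) (i : Nat)
    (g : List (List Int)) (h : pvInv nodes (pvC i nodes.length) g) :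
    pvInv nodes (pvCS (i+1)) g := by
  obtain ⟨hlen, hrow⟩ := h
  refine ⟨hlen, ?_⟩
  intro k hk
  rw [hrow k hk]
  unfold pvRow
  have hf : ∀ m ∈ List.range nodes.length,
      (pvAdj nodes k m && pvC i nodes.length k m) = (pvAdj nodes k m && pvCS (i+1) k m) := by
    intro m hm
    have hmn : m < nodes.length := List.mem_range.mp hm
    have h5 : pvC i nodes.length k m = pvCS (i+1) k m := by
      simp only [pvC, pvCS, decide_eq_decide]; omega
    rw [h5]
  rw [List.filter_congr hf]

lemma pv_outer (nodes : List (Int × Int)) :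
    ∀ (c i : Nat) (g : List (List Int)), i + c = nodes.length →
      pvInv nodes (pvCS i) g →
      pvInv nodes (pvCS nodes.length)
        ((List.range' i c).foldl
          (fun g i => (List.range' (i+1) (nodes.length - (i+1))).foldl
            (setGraphInner nodes i) g) g) := by
  intro c
  induction c with
  | zero =>
    intro i g hic hInv
    simpa [← hic] using hInv
  | succ c ih =>
    intro i g hic hInv
    rw [List.range'_succ, List.foldl_cons]
    apply ih (i+1) _ (by omega)
    apply pv_end nodes i
    exact pv_inner nodes i (nodes.length - (i+1)) (i+1) g (by omega) (by omega)
      (pv_start nodes i g hInv)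

lemma pv_base (nodes : List (Int × Int)) :
    pvInv nodes (pvCS 0) ((List.range nodes.length).map (fun _ => ([] : List Int))) := by
  refine ⟨by simp, ?_⟩
  intro k hk
  rw [List.getElem_map]
  unfold pvRow
  have : (List.range nodes.length).filter (fun m => pvAdj nodes k m && pvCS 0 k m) = [] := by
    rw [List.filter_eq_nil_iff]
    intro a _
    simp [pvCS]
  rw [this]
  simp

-- A's result, characterised
lemma pvA_rows (nodes : List (Int × Int)) :
    setGraph nodes = (List.range nodes.length).map (pvRowAll nodes) := by
  unfold setGraph
  have hInv := pv_outer nodes nodes.length 0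
    ((List.range nodes.length).map (fun _ => [])) (by omega) (pv_base nodes)
  rw [← List.range_eq_range'] at hInv
  obtain ⟨hlen, hrow⟩ := hInv
  apply List.ext_getElem
  · rw [hlen]; simp
  · intro k h1 h2
    have hk : k < nodes.length := by simpa using h2
    rw [List.getElem_map, hrow k h1]
    simp only [List.getElem_range]
    unfold pvRow pvRowAll
    have hf : ∀ m ∈ List.range nodes.length,
        (pvAdj nodes k m && pvCS nodes.length k m) = pvAdj nodes k m := by
      intro m hm
      have hmn : m < nodes.length := List.mem_range.mp hm
      have h5 : pvCS nodes.length k m = true := by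
        simp only [pvCS, decide_eq_true_eq]; omega
      rw [h5, Bool.and_true]
    rw [List.filter_congr hf]

-- ========== B-side: the u-sorted sweep fills a permutation of pvRowAll ==========

def pvOrd (nodes : List (Int × Int)) : List Nat :=
  PySem.List.sorted (List.range nodes.length) (fun k => pvU nodes k) false

def pvPos (nodes : List (Int × Int)) (k : Nat) : Nat := (pvOrd nodes).idxOf k

lemma pvOrd_perm (nodes : List (Int × Int)) : (pvOrd nodes).Perm (List.range nodes.length) :=
  PySem.List.sorted_perm _ _ _

lemma pvOrd_length (nodes : List (Int × Int)) : (pvOrd nodes).length = nodes.length := by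
  rw [(pvOrd_perm nodes).length_eq, List.length_range]

lemma pvOrd_nodup (nodes : List (Int × Int)) : (pvOrd nodes).Nodup :=
  ((pvOrd_perm nodes).nodup_iff).mpr (List.nodup_range)

lemma pvOrd_mem (nodes : List (Int × Int)) (m : Nat) :
    m ∈ pvOrd nodes ↔ m < nodes.length := by
  rw [(pvOrd_perm nodes).mem_iff, List.mem_range]

lemma pvPos_getElem (nodes : List (Int × Int)) (b : Nat) (hb : b < (pvOrd nodes).length) :
    pvPos nodes (pvOrd nodes)[b] = b :=
  List.Nodup.idxOf_getElem (pvOrd_nodup nodes) b hb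

lemma pvPos_lt_iff (nodes : List (Int × Int)) (m : Nat) :
    pvPos nodes m < nodes.length ↔ m < nodes.length := by
  unfold pvPos
  rw [← pvOrd_length nodes, List.idxOf_lt_length_iff, pvOrd_mem]
  rw [pvOrd_length]

lemma pvOrd_getElem_pos (nodes : List (Int × Int)) (m : Nat) (hm : m < nodes.length) :
    (pvOrd nodes)[pvPos nodes m]'(by rw [pvOrd_length]; exact (pvPos_lt_iff nodes m).mpr hm) = m :=
  List.getElem_idxOf _

lemma pvPos_eq_iff (nodes : List (Int × Int)) (m b : Nat) (hb : b < nodes.length) :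
    pvPos nodes m = b ↔ m = (pvOrd nodes)[b]'(by rw [pvOrd_length]; exact hb) := by
  constructor
  · intro h
    have hm : m < nodes.length := (pvPos_lt_iff nodes m).mp (h ▸ hb)
    have := pvOrd_getElem_pos nodes m hm
    simp only [h] at this
    exact this.symm
  · intro h
    subst h
    exact pvPos_getElem nodes b (by rw [pvOrd_length]; exact hb)

lemma pvOrd_mono (nodes : List (Int × Int)) (p q : Nat) (hpq : p ≤ q)
    (hq : q < (pvOrd nodes).length) :
    pvU nodes ((pvOrd nodes)[p]'(lt_of_le_of_lt hpq hq)) ≤ pvU nodes ((pvOrd nodes)[q]'hq) := by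
  have h := PySem.List.key_sorted_getElem_mono (xs := List.range nodes.length)
    (key := fun k => pvU nodes k) (p := p) (q := q) hpq (by simpa [pvOrd] using hq)
  simpa [pvOrd] using h

-- Manhattan distance is the Chebyshev distance of the rotated coordinates
lemma pv_abs_max (a b : Int) : |a| + |b| = max |a + b| |a - b| := by
  rw [max_def]
  rcases abs_cases a with ⟨h1, h2⟩ | ⟨h1, h2⟩ <;>
    rcases abs_cases b with ⟨h3, h4⟩ | ⟨h3, h4⟩ <;>
    rcases abs_cases (a + b) with ⟨h5, h6⟩ | ⟨h5, h6⟩ <;>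
    rcases abs_cases (a - b) with ⟨h7, h8⟩ | ⟨h7, h8⟩ <;>
    split_ifs <;> omega

lemma pvDist_max (nodes : List (Int × Int)) (k m : Nat) :
    pvDist nodes k m = max |pvU nodes k - pvU nodes m| |pvV nodes k - pvV nodes m| := by
  unfold pvDist pvU pvV
  rw [pv_abs_max]
  ring_nf

-- filter gains exactly one new element j when the condition flips only at j
lemma pv_filter_insert {c c' : Nat → Bool} {j : Nat} :
    ∀ (l : List Nat), l.Nodup → j ∈ l →
      c j = false → c' j = true → (∀ m, m ≠ j → c' m = c m) →
      (l.filter c').Perm (l.filter c ++ [j]) := by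
  intro l
  induction l with
  | nil => intro _ h; exact absurd h (List.not_mem_nil)
  | cons x t ih =>
    intro hnd hj hc hc' hag
    rcases List.mem_cons.mp hj with rfl | hjt
    · have hjt : j ∉ t := (List.nodup_cons.mp hnd).1
      have ht : t.filter c' = t.filter c := by
        apply List.filter_congr
        intro m hm
        exact hag m (fun h => hjt (h ▸ hm))
      simp only [List.filter_cons, hc, hc', if_pos, if_neg, Bool.false_eq_true,
        not_false_iff, ht]
      simpa using List.perm_append_comm (l₁ := [j]) (l₂ := t.filter c)
    · have hxj : x ≠ j := fun h => (List.nodup_cons.mp hnd).1 (h ▸ hjt)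
      have hx : c' x = c x := hag x hxj
      have ihp := ih (List.nodup_cons.mp hnd).2 hjt hc hc' hag
      by_cases hcx : c x = true
      · simp only [List.filter_cons, hx, hcx, if_pos]
        exact (ihp.cons x).trans (by simp)
      · have hcx' : c x = false := by revert hcx; cases c x <;> simp
        simp only [List.filter_cons, hx, hcx', Bool.false_eq_true, if_neg, not_false_iff]
        exact ihp

-- invariant: each row is a permutation of the adjacency row restricted by condition c
def pvInvB (nodes : List (Int × Int)) (c : Nat → Nat → Bool) (rows : List (List Int)) : Prop :=
  rows.length = nodes.length ∧ ∀ k, (h : k < rows.length) →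
    rows[k].Perm (((List.range nodes.length).filter
        (fun m => pvAdj nodes k m && c k m)).map (fun m : Nat => (m : Int)))

lemma pvInvB_congr (nodes : List (Int × Int)) {c c' : Nat → Nat → Bool}
    (h : ∀ k m, k < nodes.length → m < nodes.length → pvAdj nodes k m = true → c k m = c' k m)
    {rows : List (List Int)} (hi : pvInvB nodes c rows) : pvInvB nodes c' rows := by
  obtain ⟨hlen, hrow⟩ := hi
  refine ⟨hlen, ?_⟩
  intro k hk
  have := hrow k hk
  have hf : ∀ m ∈ List.range nodes.length,
      (pvAdj nodes k m && c k m) = (pvAdj nodes k m && c' k m) := by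
    intro m hm
    by_cases ha : pvAdj nodes k m = true
    · rw [ha, Bool.true_and, Bool.true_and]
      exact h k m (hlen ▸ hk) (List.mem_range.mp hm) ha
    · rw [Bool.not_eq_true] at ha; rw [ha, Bool.false_and, Bool.false_and]
  rwa [List.filter_congr hf] at this

-- processed-pairs condition during outer iteration a, inner counter cnt
def pvW (nodes : List (Int × Int)) (a cnt : Nat) (k m : Nat) : Bool :=
  decide ((pvPos nodes k < a ∧ pvPos nodes m < a) ∨
          (pvPos nodes k = a ∧ cnt ≤ pvPos nodes m ∧ pvPos nodes m < a) ∨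
          (pvPos nodes m = a ∧ cnt ≤ pvPos nodes k ∧ pvPos nodes k < a))

lemma pv_innerB (nodes : List (Int × Int)) (a : Nat) (ha : a < nodes.length) :
    ∀ (cnt : Nat) (rows : List (List Int)), cnt ≤ a →
      pvInvB nodes (pvW nodes a cnt) rows →
      pvInvB nodes (pvW nodes a 0)
        (setGraphAltInner nodes (pvOrd nodes)
          ((pvOrd nodes)[a]'(by rw [pvOrd_length]; exact ha))
          (pvU nodes ((pvOrd nodes)[a]'(by rw [pvOrd_length]; exact ha)))
          (pvV nodes ((pvOrd nodes)[a]'(by rw [pvOrd_length]; exact ha)))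
          cnt rows) := by
  have hal : a < (pvOrd nodes).length := by rw [pvOrd_length]; exact ha
  intro cnt
  induction cnt with
  | zero => intro rows _ hInv; exact hInv
  | succ cnt ih =>
    intro rows hcnt hInv
    have hcl : cnt < (pvOrd nodes).length := by omega
    have hgd : (pvOrd nodes).getD cnt 0 = (pvOrd nodes)[cnt]'hcl := List.getD_eq_getElem _ _ hcl
    have hposi : pvPos nodes ((pvOrd nodes)[a]'hal) = a := pvPos_getElem nodes a hal
    have hposj : pvPos nodes ((pvOrd nodes)[cnt]'hcl) = cnt := pvPos_getElem nodes cnt hcl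
    have hij : (pvOrd nodes)[a]'hal ≠ (pvOrd nodes)[cnt]'hcl := by
      intro h
      have := hposi
      rw [h, hposj] at this
      omega
    have hin : (pvOrd nodes)[a]'hal < nodes.length :=
      (pvOrd_mem nodes _).mp (List.getElem_mem hal)
    have hjn : (pvOrd nodes)[cnt]'hcl < nodes.length :=
      (pvOrd_mem nodes _).mp (List.getElem_mem hcl)
    have hmonoij : pvU nodes ((pvOrd nodes)[cnt]'hcl) ≤ pvU nodes ((pvOrd nodes)[a]'hal) :=
      pvOrd_mono nodes cnt a (by omega) hal
    rw [setGraphAltInner]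
    simp only [hgd]
    by_cases hu : pvU nodes ((pvOrd nodes)[a]'hal) - pvU nodes ((pvOrd nodes)[cnt]'hcl) ≤ 1000
    · rw [if_pos hu]
      apply ih _ (by omega)
      -- one inner step: condition moves from cnt+1 to cnt, adding the pair (i, j)
      -- flip characterisation: pvW a cnt differs from pvW a (cnt+1) exactly at
      -- (k,m) with pos k = a, pos m = cnt or symmetrically
      have hflip : ∀ k m, pvW nodes a cnt k m ≠ pvW nodes a (cnt+1) k m →
          (pvPos nodes k = a ∧ pvPos nodes m = cnt) ∨
          (pvPos nodes m = a ∧ pvPos nodes k = cnt) := by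
        intro k m h
        by_contra hc
        push_neg at hc
        apply h
        simp only [pvW, decide_eq_decide]
        omega
      by_cases hv : |pvV nodes ((pvOrd nodes)[a]'hal) - pvV nodes ((pvOrd nodes)[cnt]'hcl)| ≤ 1000
      · rw [if_pos hv]
        obtain ⟨hlen, hrow⟩ := hInv
        have hadj : pvAdj nodes ((pvOrd nodes)[a]'hal) ((pvOrd nodes)[cnt]'hcl) = true := by
          simp only [pvAdj, Bool.and_eq_true, decide_eq_true_eq]
          refine ⟨fun h => hij h.symm, ?_⟩
          rw [pvDist_max, max_le_iff]
          exact ⟨by rw [abs_of_nonneg (by omega)]; exact hu, hv⟩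
        refine ⟨by simpa [List.length_modify] using hlen, ?_⟩
        intro k hk
        have hk2 : k < rows.length := by simpa [List.length_modify] using hk
        have hkn : k < nodes.length := by rw [← hlen]; exact hk2
        rw [List.getElem_modify, List.getElem_modify]
        by_cases hkj : (pvOrd nodes)[cnt]'hcl = k
        · subst hkj
          rw [if_pos rfl, if_neg hij]
          -- row j gains i
          refine ((hrow _ hk2).append_right [((pvOrd nodes)[a]'hal : Int)]).trans ?_
          have hcF : (pvAdj nodes ((pvOrd nodes)[cnt]'hcl) ((pvOrd nodes)[a]'hal) &&
              pvW nodes a (cnt+1) ((pvOrd nodes)[cnt]'hcl) ((pvOrd nodes)[a]'hal)) = false := by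
            simp only [Bool.and_eq_false_iff]
            right
            simp only [pvW, decide_eq_false_iff_not]
            rw [hposi, hposj]
            omega
          have hcT : (pvAdj nodes ((pvOrd nodes)[cnt]'hcl) ((pvOrd nodes)[a]'hal) &&
              pvW nodes a cnt ((pvOrd nodes)[cnt]'hcl) ((pvOrd nodes)[a]'hal)) = true := by
            simp only [Bool.and_eq_true]
            constructor
            · simp only [pvAdj, Bool.and_eq_true, decide_eq_true_eq] at hadj ⊢
              exact ⟨fun h => hadj.1 h.symm, by rw [pvDist_symm]; exact hadj.2⟩
            · simp only [pvW, decide_eq_true_eq]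
              rw [hposi, hposj]
              omega
          have hag : ∀ m, m ≠ (pvOrd nodes)[a]'hal →
              (pvAdj nodes ((pvOrd nodes)[cnt]'hcl) m &&
                pvW nodes a cnt ((pvOrd nodes)[cnt]'hcl) m) =
              (pvAdj nodes ((pvOrd nodes)[cnt]'hcl) m &&
                pvW nodes a (cnt+1) ((pvOrd nodes)[cnt]'hcl) m) := by
            intro m hmi
            by_cases hd : pvW nodes a cnt ((pvOrd nodes)[cnt]'hcl) m =
                pvW nodes a (cnt+1) ((pvOrd nodes)[cnt]'hcl) m
            · rw [hd]
            · exfalso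
              rcases hflip _ m hd with ⟨h1, h2⟩ | ⟨h1, h2⟩
              · rw [hposj] at h1; omega
              · exact hmi ((pvPos_eq_iff nodes m a ha).mp h1)
          have hperm := pv_filter_insert
            (List.range nodes.length) List.nodup_range (List.mem_range.mpr hin)
            hcF hcT hag
          have h2 := (hperm.map (fun m : Nat => (m : Int))).symm
          rw [List.map_append] at h2
          simpa using h2
        · by_cases hki : (pvOrd nodes)[a]'hal = k
          · subst hki
            rw [if_neg hkj, if_pos rfl]
            -- row i gains j
            refine ((hrow _ hk2).append_right [((pvOrd nodes)[cnt]'hcl : Int)]).trans ?_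
            have hcF : (pvAdj nodes ((pvOrd nodes)[a]'hal) ((pvOrd nodes)[cnt]'hcl) &&
                pvW nodes a (cnt+1) ((pvOrd nodes)[a]'hal) ((pvOrd nodes)[cnt]'hcl)) = false := by
              simp only [Bool.and_eq_false_iff]
              right
              simp only [pvW, decide_eq_false_iff_not]
              rw [hposi, hposj]
              omega
            have hcT : (pvAdj nodes ((pvOrd nodes)[a]'hal) ((pvOrd nodes)[cnt]'hcl) &&
                pvW nodes a cnt ((pvOrd nodes)[a]'hal) ((pvOrd nodes)[cnt]'hcl)) = true := by
              simp only [Bool.and_eq_true]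
              exact ⟨hadj, by
                simp only [pvW, decide_eq_true_eq]
                rw [hposi, hposj]
                omega⟩
            have hag : ∀ m, m ≠ (pvOrd nodes)[cnt]'hcl →
                (pvAdj nodes ((pvOrd nodes)[a]'hal) m &&
                  pvW nodes a cnt ((pvOrd nodes)[a]'hal) m) =
                (pvAdj nodes ((pvOrd nodes)[a]'hal) m &&
                  pvW nodes a (cnt+1) ((pvOrd nodes)[a]'hal) m) := by
              intro m hmj
              by_cases hd : pvW nodes a cnt ((pvOrd nodes)[a]'hal) m =
                  pvW nodes a (cnt+1) ((pvOrd nodes)[a]'hal) m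
              · rw [hd]
              · exfalso
                rcases hflip _ m hd with ⟨h1, h2⟩ | ⟨h1, h2⟩
                · exact hmj ((pvPos_eq_iff nodes m cnt (by omega)).mp h2)
                · rw [hposi] at h2; omega
            have hperm := pv_filter_insert
              (List.range nodes.length) List.nodup_range (List.mem_range.mpr hjn)
              hcF hcT hag
            have h2 := (hperm.map (fun m : Nat => (m : Int))).symm
            rw [List.map_append] at h2
            simpa using h2
          · rw [if_neg hkj, if_neg hki]
            refine (hrow k hk2).trans ?_
            have hf : ∀ m ∈ List.range nodes.length,
                (pvAdj nodes k m && pvW nodes a (cnt+1) k m) =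
                (pvAdj nodes k m && pvW nodes a cnt k m) := by
              intro m _
              by_cases hd : pvW nodes a cnt k m = pvW nodes a (cnt+1) k m
              · simp only [hd]
              · exfalso
                rcases hflip k m hd with ⟨h1, h2⟩ | ⟨h1, h2⟩
                · exact hki ((pvPos_eq_iff nodes k a ha).mp h1).symm
                · exact hkj ((pvPos_eq_iff nodes k cnt (by omega)).mp h2).symm
            rw [List.filter_congr hf]
      · rw [if_neg hv]
        -- the pair is within the u-window but not adjacent: nothing changes
        apply pvInvB_congr nodes ?_ hInv
        intro k m hkn hmn hadj
        by_cases hd : pvW nodes a (cnt+1) k m = pvW nodes a cnt k m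
        · exact hd
        · exfalso
          have hnadj : pvAdj nodes ((pvOrd nodes)[a]'hal) ((pvOrd nodes)[cnt]'hcl) ≠ true := by
            intro h7
            simp only [pvAdj, Bool.and_eq_true, decide_eq_true_eq] at h7
            rw [pvDist_max, max_le_iff] at h7
            exact hv h7.2.2
          rcases hflip k m (fun h => hd h.symm) with ⟨h1, h2⟩ | ⟨h1, h2⟩
          · have hk' : k = (pvOrd nodes)[a]'hal := (pvPos_eq_iff nodes k a ha).mp h1
            have hm' : m = (pvOrd nodes)[cnt]'hcl := (pvPos_eq_iff nodes m cnt (by omega)).mp h2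
            subst hk'; subst hm'
            exact hnadj hadj
          · have hm' : m = (pvOrd nodes)[a]'hal := (pvPos_eq_iff nodes m a ha).mp h1
            have hk' : k = (pvOrd nodes)[cnt]'hcl := (pvPos_eq_iff nodes k cnt (by omega)).mp h2
            subst hm'; subst hk'
            apply hnadj
            simp only [pvAdj, Bool.and_eq_true, decide_eq_true_eq] at hadj ⊢
            exact ⟨fun h => hadj.1 h.symm, by rw [pvDist_symm]; exact hadj.2⟩
    · rw [if_neg hu]
      -- early exit: every remaining candidate is more than 1000 away in u, so no
      -- adjacent pair is missed
      apply pvInvB_congr nodes ?_ hInv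
      intro k m hkn hmn hadj
      by_cases hd : pvW nodes a (cnt+1) k m = pvW nodes a 0 k m
      · exact hd
      · exfalso
        have hflip : (pvPos nodes k = a ∧ pvPos nodes m ≤ cnt) ∨
            (pvPos nodes m = a ∧ pvPos nodes k ≤ cnt) := by
          by_contra hc
          push_neg at hc
          apply hd
          simp only [pvW, decide_eq_decide]
          omega
        have key : ∀ k' m', pvPos nodes k' = a → pvPos nodes m' ≤ cnt →
            m' < nodes.length → pvAdj nodes k' m' ≠ true := by
          intro k' m' h1 h2 hm'n
          have hk'' : k' = (pvOrd nodes)[a]'hal := (pvPos_eq_iff nodes k' a ha).mp h1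
          subst hk''
          have hm2 : pvPos nodes m' < (pvOrd nodes).length := by
            rw [pvOrd_length]; omega
          have hmono2 : pvU nodes ((pvOrd nodes)[pvPos nodes m']'hm2) ≤
              pvU nodes ((pvOrd nodes)[cnt]'hcl) :=
            pvOrd_mono nodes (pvPos nodes m') cnt h2 hcl
          rw [pvOrd_getElem_pos nodes m' hm'n] at hmono2
          intro h7
          simp only [pvAdj, Bool.and_eq_true, decide_eq_true_eq] at h7
          rw [pvDist_max, max_le_iff] at h7
          have h6 := h7.2.1
          rw [abs_of_nonneg (by omega)] at h6
          omega
        rcases hflip with ⟨h1, h2⟩ | ⟨h1, h2⟩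
        · exact key k m h1 h2 hmn hadj
        · apply key m k h1 h2 hkn
          simp only [pvAdj, Bool.and_eq_true, decide_eq_true_eq] at hadj ⊢
          exact ⟨fun h => hadj.1 h.symm, by rw [pvDist_symm]; exact hadj.2⟩

lemma pv_outerB (nodes : List (Int × Int)) :
    ∀ (c a : Nat) (rows : List (List Int)), a + c = nodes.length →
      pvInvB nodes (pvW nodes a a) rows →
      pvInvB nodes (fun k m => decide (pvPos nodes k < nodes.length ∧
          pvPos nodes m < nodes.length))
        ((List.range' a c).foldl
          (fun rows a =>
            let i := (pvOrd nodes).getD a 0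
            setGraphAltInner nodes (pvOrd nodes) i (pvU nodes i) (pvV nodes i) a rows)
          rows) := by
  intro c
  induction c with
  | zero =>
    intro a rows hac hInv
    simp only [List.range', List.foldl_nil]
    apply pvInvB_congr nodes ?_ hInv
    intro k m hkn hmn _
    simp only [pvW, decide_eq_decide]
    omega
  | succ c ih =>
    intro a rows hac hInv
    rw [List.range'_succ, List.foldl_cons]
    have ha : a < nodes.length := by omega
    have hal : a < (pvOrd nodes).length := by rw [pvOrd_length]; exact ha
    have hgd : (pvOrd nodes).getD a 0 = (pvOrd nodes)[a]'hal := List.getD_eq_getElem _ _ hal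
    simp only [hgd]
    apply ih (a+1) _ (by omega)
    have hstep := pv_innerB nodes a ha a rows (le_refl a) ?_
    · apply pvInvB_congr nodes ?_ hstep
      intro k m hkn hmn hadj
      have hkm : k ≠ m := by
        simp only [pvAdj, Bool.and_eq_true, decide_eq_true_eq] at hadj
        exact fun h => hadj.1 h.symm
      have hne : ¬ (pvPos nodes k = a ∧ pvPos nodes m = a) := by
        rintro ⟨h1, h2⟩
        exact hkm (((pvPos_eq_iff nodes k a ha).mp h1).trans
          ((pvPos_eq_iff nodes m a ha).mp h2).symm)
      simp only [pvW, decide_eq_decide]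
      omega
    · exact hInv

lemma pv_baseB (nodes : List (Int × Int)) :
    pvInvB nodes (pvW nodes 0 0) ((List.range nodes.length).map (fun _ => ([] : List Int))) := by
  refine ⟨by simp, ?_⟩
  intro k hk
  rw [List.getElem_map]
  have : (List.range nodes.length).filter
      (fun m => pvAdj nodes k m && pvW nodes 0 0 k m) = [] := by
    rw [List.filter_eq_nil_iff]
    intro a _
    simp [pvW]
  rw [this]
  simp

lemma pvRowAll_pairwise (nodes : List (Int × Int)) (k : Nat) :
    (pvRowAll nodes k).Pairwise (· < ·) := by
  unfold pvRowAll
  rw [List.pairwise_map]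
  have h : (List.range nodes.length).Pairwise (fun a b : Nat => (a : Int) < (b : Int)) :=
    (List.pairwise_lt_range).imp (fun h => by exact_mod_cast h)
  exact h.filter _

lemma pvB_rows (nodes : List (Int × Int)) :
    setGraph_alt nodes = (List.range nodes.length).map (pvRowAll nodes) := by
  unfold setGraph_alt
  have hInv := pv_outerB nodes nodes.length 0
    ((List.range nodes.length).map (fun _ => [])) (by omega) (pv_baseB nodes)
  rw [← List.range_eq_range'] at hInv
  obtain ⟨hlen, hrow⟩ := hInv
  show ((List.range nodes.length).foldl
      (fun rows a =>
        let i := (pvOrd nodes).getD a 0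
        setGraphAltInner nodes (pvOrd nodes) i (pvU nodes i) (pvV nodes i) a rows)
      ((List.range nodes.length).map (fun _ => ([] : List Int)))).map
      (fun r => PySem.List.sorted r (fun x => x) false) =
    (List.range nodes.length).map (pvRowAll nodes)
  apply List.ext_getElem
  · rw [List.length_map, hlen]; simp
  · intro k h1 h2
    have hk : k < nodes.length := by simpa using h2
    rw [List.length_map] at h1
    rw [List.getElem_map, List.getElem_map, List.getElem_range]
    have hperm := hrow k h1
    have hf : ∀ m ∈ List.range nodes.length,
        (pvAdj nodes k m &&
          decide (pvPos nodes k < nodes.length ∧ pvPos nodes m < nodes.length)) =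
        pvAdj nodes k m := by
      intro m hm
      have hmn : m < nodes.length := List.mem_range.mp hm
      have h5 : decide (pvPos nodes k < nodes.length ∧ pvPos nodes m < nodes.length) = true := by
        simp only [decide_eq_true_eq]
        exact ⟨(pvPos_lt_iff nodes k).mpr hk, (pvPos_lt_iff nodes m).mpr hmn⟩
      rw [h5, Bool.and_true]
    rw [List.filter_congr hf] at hperm
    exact PySem.List.sorted_eq_of_perm_of_pairwise_lt _ _ _ hperm.symm (pvRowAll_pairwise nodes k)

-- ===== VERDICT (by name: the statement is the Claim_ definition above) =====
theorem setGraph_spec : Claim_equal_setGraph := by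
  intro nodes _
  unfold Spec_setGraph
  rw [pvA_rows, pvB_rows]
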